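-- pv_equiv track=rewrite | github.com/Romaanj/dllm_basic_gsm8k_benchmark_test | llada/gsm8k_window_fragmentation_keep_split_eval.py | fixed_blocks
-- ===== SOURCE A (Python) =====
-- from typing import Any, Dict, List, Optional, Tuple
--
-- def fixed_blocks(gen_length: int, num_blocks: int) -> List[Tuple[int, int]]:
--     if num_blocks <= 0:
--         return [(0, gen_length)]
--     num_blocks = min(num_blocks, gen_length)
--     base = gen_length // num_blocks
--     rem = gen_length % num_blocks
--     sizes = [base + (1 if i < rem else 0) for i in range(num_blocks)]
--     blocks: List[Tuple[int, int]] = []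
--     cur = 0
--     for s in sizes:
--         nxt = min(gen_length, cur + s)
--         if nxt > cur:
--             blocks.append((cur, nxt))
--         cur = nxt
--     if blocks and blocks[-1][1] < gen_length:
--         blocks[-1] = (blocks[-1][0], gen_length)
--     return blocks if blocks else [(0, gen_length)]
-- ===== SOURCE B (Python) =====
-- def fixed_blocks(gen_length: int, num_blocks: int):
--     if num_blocks <= 0:
--         return [(0, gen_length)]
--     n = min(num_blocks, gen_length)
--     base, rem = divmod(gen_length, n)
--     blocks = [(i * base + min(i, rem), (i + 1) * base + min(i + 1, rem))
--               for i in range(n)]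
--     return blocks if blocks else [(0, gen_length)]
-- ===== Notes on version B (the rewrite author's own statement) =====
-- stated objective: simpler
-- what changed: Replaces the sizes list, running cursor, min-clamp and last-block fixup with a single comprehension computing each block boundary by the closed-form index formula i*base+min(i,rem).
import Mathlib
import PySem

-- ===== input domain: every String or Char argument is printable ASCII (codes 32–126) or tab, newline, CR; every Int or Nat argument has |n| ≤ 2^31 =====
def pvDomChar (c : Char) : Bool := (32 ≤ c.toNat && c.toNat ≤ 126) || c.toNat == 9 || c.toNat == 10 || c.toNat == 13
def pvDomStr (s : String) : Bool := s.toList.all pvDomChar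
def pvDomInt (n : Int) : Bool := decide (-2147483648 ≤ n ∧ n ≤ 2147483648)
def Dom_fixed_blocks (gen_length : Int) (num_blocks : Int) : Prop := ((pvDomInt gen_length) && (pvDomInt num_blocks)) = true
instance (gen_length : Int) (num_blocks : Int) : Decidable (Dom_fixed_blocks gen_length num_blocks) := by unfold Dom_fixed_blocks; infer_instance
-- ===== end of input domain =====

-- B replaces A's sizes list, running cursor, min-clamp and last-block fixup with one
-- comprehension computing each boundary by the closed-form formula i*base + min i rem (objective: simpler).

-- ===== PORT A =====
def fixed_blocks (gen_length : Int) (num_blocks : Int) : List (Int × Int) :=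
  if num_blocks ≤ 0 then [(0, gen_length)]
  else
    let num_blocks := min num_blocks gen_length
    let base := PySem.Int.floordiv gen_length num_blocks
    let rem := PySem.Int.mod gen_length num_blocks
    let sizes := (PySem.List.pyRange 0 num_blocks 1).map
      (fun i => base + (if i < rem then (1 : Int) else 0))
    let st := sizes.foldl
      (fun (st : List (Int × Int) × Int) s =>
        let nxt := min gen_length (st.2 + s)
        (if nxt > st.2 then st.1 ++ [(st.2, nxt)] else st.1, nxt)) ([], 0)
    let blocks := st.1
    let blocks :=
      match blocks.getLast? with
      | some last => if last.2 < gen_length then blocks.dropLast ++ [(last.1, gen_length)] else blocks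
      | none => blocks
    if blocks = [] then [(0, gen_length)] else blocks

-- ===== PORT B =====
def fixed_blocks_alt (gen_length : Int) (num_blocks : Int) : List (Int × Int) :=
  if num_blocks ≤ 0 then [(0, gen_length)]
  else
    let n := min num_blocks gen_length
    let base := PySem.Int.floordiv gen_length n
    let rem := PySem.Int.mod gen_length n
    let blocks := (PySem.List.pyRange 0 n 1).map
      (fun i => (i * base + min i rem, (i + 1) * base + min (i + 1) rem))
    if blocks = [] then [(0, gen_length)] else blocks

-- ===== PRECONDITION & SPEC =====
-- Pre_ excludes exactly the inputs where A raises ZeroDivisionError (gen_length = 0 with positive num_blocks).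
def Pre_fixed_blocks (gen_length : Int) (num_blocks : Int) : Prop :=
  ¬ (0 < num_blocks ∧ gen_length = 0)
instance (gen_length : Int) (num_blocks : Int) : Decidable (Pre_fixed_blocks gen_length num_blocks) := by unfold Pre_fixed_blocks; infer_instance
def pvWitness_fixed_blocks : Int × Int := (10, 3)

def Spec_fixed_blocks (gen_length : Int) (num_blocks : Int) (out : List (Int × Int)) : Prop := out = fixed_blocks_alt gen_length num_blocks
instance (gen_length : Int) (num_blocks : Int) (out : List (Int × Int)) : Decidable (Spec_fixed_blocks gen_length num_blocks out) := by unfold Spec_fixed_blocks; infer_instance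

-- ===== CLAIM (what is proved, stated in full; the proofs are below) =====
def Claim_equal_fixed_blocks : Prop := ∀ (gen_length : Int) (num_blocks : Int), Dom_fixed_blocks gen_length num_blocks → Pre_fixed_blocks gen_length num_blocks → Spec_fixed_blocks gen_length num_blocks (fixed_blocks gen_length num_blocks)

-- ===== LEMMAS AND PROOFS =====

-- the prefix-sum boundary function: start of block i
def pvF (base rem i : Int) : Int := i * base + min i rem

lemma pvF_mono (base rem : Int) (hb : 0 ≤ base) {i j : Int} (hij : i ≤ j) :
    pvF base rem i ≤ pvF base rem j := by
  unfold pvF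
  have h1 : i * base ≤ j * base := mul_le_mul_of_nonneg_right hij hb
  have h2 : min i rem ≤ min j rem := by omega
  omega

lemma pvF_step (base rem a : Int) (_hr : 0 ≤ rem) :
    pvF base rem a + (base + (if a < rem then (1 : Int) else 0)) = pvF base rem (a + 1) := by
  unfold pvF
  rcases lt_or_ge a rem with h | h <;> simp [h] <;> ring_nf <;> omega

-- invariant of A's accumulation loop
lemma pvFoldInv (g base rem n : Int) (hb : 1 ≤ base) (hr : 0 ≤ rem) (hrn : rem ≤ n)
    (hg : pvF base rem n = g) :
    ∀ (k : Nat) (a : Int) (acc : List (Int × Int)), 0 ≤ a → a ≤ n → (n - a).toNat = k →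
    ((PySem.List.pyRange a n 1).map (fun i => base + (if i < rem then (1 : Int) else 0))).foldl
      (fun (st : List (Int × Int) × Int) s =>
        let nxt := min g (st.2 + s)
        (if nxt > st.2 then st.1 ++ [(st.2, nxt)] else st.1, nxt)) (acc, pvF base rem a)
    = (acc ++ (PySem.List.pyRange a n 1).map (fun i => (pvF base rem i, pvF base rem (i + 1))),
       pvF base rem n) := by
  intro k
  induction k with
  | zero =>
    intro a acc _ han hk
    have hEq : a = n := by omega
    subst hEq
    simp [PySem.List.pyRange_one_eq_nil (le_refl a)]
  | succ k ih =>
    intro a acc ha0 han hk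
    have hlt : a < n := by omega
    rw [PySem.List.pyRange_one_cons hlt]
    simp only [List.map_cons, List.foldl_cons]
    have hstep := pvF_step base rem a hr
    have hle : pvF base rem (a + 1) ≤ g := by
      rw [← hg]; exact pvF_mono base rem (by omega) (by omega)
    have hmin : min g (pvF base rem a + (base + (if a < rem then (1 : Int) else 0)))
        = pvF base rem (a + 1) := by rw [hstep]; omega
    have hgt : pvF base rem a < pvF base rem (a + 1) := by
      rw [← hstep]; split_ifs <;> omega
    rw [hmin, if_pos hgt,
      ih (a + 1) (acc ++ [(pvF base rem a, pvF base rem (a + 1))]) (by omega) (by omega) (by omega)]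
    simp

lemma getLast?_map_pyRange {α : Type} (n : Int) (hn : 0 < n) (f : Int → α) :
    ((PySem.List.pyRange 0 n 1).map f).getLast? = some (f (n - 1)) := by
  have h : PySem.List.pyRange 0 n 1 = PySem.List.pyRange 0 (n - 1) 1 ++ [n - 1] := by
    have h2 := PySem.List.pyRange_one_succ_right (a := 0) (b := n - 1) (by omega)
    rw [show n - 1 + 1 = n by omega] at h2
    exact h2
  rw [h]; simp

-- ===== VERDICT (by name: the statement is the Claim_ definition above) =====
theorem fixed_blocks_spec : Claim_equal_fixed_blocks := by
  intro g nb _ hpre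
  unfold Spec_fixed_blocks
  by_cases hnb : nb ≤ 0
  · simp [fixed_blocks, fixed_blocks_alt, if_pos hnb]
  · rw [not_le] at hnb
    rcases lt_trichotomy g 0 with hg | hg | hg
    · -- negative gen_length: the range is empty, both fall back to [(0, g)]
      have hrange : PySem.List.pyRange 0 (min nb g) 1 = [] :=
        PySem.List.pyRange_one_eq_nil (by omega)
      simp [fixed_blocks, fixed_blocks_alt, hrange]
    · exact absurd ⟨hnb, hg⟩ hpre
    · -- positive gen_length
      set n := min nb g with hn
      have hn1 : 1 ≤ n := by omega
      have hng : n ≤ g := min_le_right _ _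
      set base := PySem.Int.floordiv g n with hbdef
      set rem := PySem.Int.mod g n with hrdef
      have hnpos : (0 : Int) < n := by omega
      have hbase : 1 ≤ base := by
        rw [hbdef, PySem.Int.floordiv_eq_ediv_of_pos hnpos]
        rw [Int.le_ediv_iff_mul_le hnpos]; omega
      have hrem0 : 0 ≤ rem := PySem.Int.mod_nonneg g hnpos
      have hremn : rem < n := PySem.Int.mod_lt g hnpos
      have hsum : pvF base rem n = g := by
        have h1 := PySem.Int.floordiv_mul_add_mod g n
        rw [← hbdef, ← hrdef] at h1
        have h2 : n * base = base * n := mul_comm _ _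
        unfold pvF
        rw [min_eq_right (le_of_lt hremn)]
        omega
      have hfold := pvFoldInv g base rem n hbase hrem0 (le_of_lt hremn) hsum
        n.toNat 0 [] (le_refl 0) (by omega) (by omega)
      have hF0 : pvF base rem 0 = 0 := by unfold pvF; omega
      rw [hF0] at hfold
      have hlast := getLast?_map_pyRange n hnpos
        (fun i => (pvF base rem i, pvF base rem (i + 1)))
      have hne : ((PySem.List.pyRange 0 n 1).map
          (fun i => (pvF base rem i, pvF base rem (i + 1)))) ≠ [] := by
        rw [PySem.List.pyRange_one_cons hnpos]; simp
      show fixed_blocks g nb = fixed_blocks_alt g nb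
      unfold fixed_blocks fixed_blocks_alt
      rw [if_neg (not_le.mpr hnb), if_neg (not_le.mpr hnb)]
      have hne2 : ((PySem.List.pyRange 0 n 1).map
          (fun i => (i * base + min i rem, (i + 1) * base + min (i + 1) rem))) ≠ [] := by
        rw [PySem.List.pyRange_one_cons hnpos]; simp
      simp only [← hn, ← hbdef, ← hrdef, hfold, List.nil_append, hlast]
      rw [show pvF base rem (n - 1 + 1) = g from by rw [show n - 1 + 1 = n by omega]; exact hsum]
      rw [if_neg (lt_irrefl g), if_neg hne, if_neg hne2]
      simp [pvF]
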